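-- pv_equiv track=rewrite | github.com/danieleschmidt/Memristor-NN-Simulator | memristor_nn/mapping/neural_mapper.py | _calculate_tiling
-- ===== SOURCE A (Python) =====
-- from typing import List, Union, Dict, Any
--
-- def _calculate_tiling(input_size: int, output_size: int, tile_size: int) -> List[tuple]:
--     """Calculate optimal tiling strategy for large layers."""
--     tiles = []
--
--     # Simple row-major tiling
--     for row_start in range(0, output_size, tile_size):
--         row_end = min(row_start + tile_size, output_size)
--
--         for col_start in range(0, input_size, tile_size):
--             col_end = min(col_start + tile_size, input_size)
--
--             tiles.append((row_start, row_end, col_start, col_end))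
--
--     return tiles
-- ===== SOURCE B (Python) =====
-- def _calculate_tiling(input_size: int, output_size: int, tile_size: int):
--     """Calculate optimal tiling strategy for large layers."""
--     # number of tiles along an axis: ceiling division, clamped at 0
--     nrows = max(0, -((-output_size) // tile_size))
--     ncols = max(0, -((-input_size) // tile_size))
--     tiles = []
--     for k in range(nrows * ncols):
--         i, j = divmod(k, ncols)
--         rs = i * tile_size
--         cs = j * tile_size
--         tiles.append((rs, min(rs + tile_size, output_size),
--                       cs, min(cs + tile_size, input_size)))
--     return tiles
-- ===== Notes on version B (the rewrite author's own statement) =====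
-- stated objective: alternative
-- what changed: B replaces A's nested loops over two Python ranges by first computing the tile-grid dimensions with clamped ceiling division and then a single flat loop over all tile indices, recovering the row/column tile via divmod.
import Mathlib
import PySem

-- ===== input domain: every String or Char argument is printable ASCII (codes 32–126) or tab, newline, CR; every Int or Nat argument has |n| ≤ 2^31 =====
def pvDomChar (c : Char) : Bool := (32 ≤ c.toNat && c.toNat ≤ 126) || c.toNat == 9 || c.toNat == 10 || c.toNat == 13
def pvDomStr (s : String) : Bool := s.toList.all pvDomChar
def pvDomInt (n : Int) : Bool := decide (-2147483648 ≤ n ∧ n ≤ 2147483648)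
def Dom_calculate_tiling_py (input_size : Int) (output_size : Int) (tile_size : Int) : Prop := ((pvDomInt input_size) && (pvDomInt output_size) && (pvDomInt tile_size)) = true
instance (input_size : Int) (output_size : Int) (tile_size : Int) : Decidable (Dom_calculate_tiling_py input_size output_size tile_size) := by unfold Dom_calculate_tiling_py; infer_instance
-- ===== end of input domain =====

-- B replaces A's nested range loops by a single flat loop over all tile indices
-- (grid dimensions via clamped ceiling division, row/col recovered by divmod); objective: alternative.
-- ===== PORT A =====
-- Port of A: nested foldl over Python ranges, appending one tile per inner step.
def calculate_tiling_py (input_size : Int) (output_size : Int) (tile_size : Int) : List (Int × Int × Int × Int) :=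
  (PySem.List.pyRange 0 output_size tile_size).foldl (fun tiles row_start =>
    let row_end := min (row_start + tile_size) output_size
    (PySem.List.pyRange 0 input_size tile_size).foldl (fun tiles col_start =>
      let col_end := min (col_start + tile_size) input_size
      tiles ++ [(row_start, row_end, col_start, col_end)]) tiles) []

-- ===== PORT B =====
-- Port of B: grid sizes by clamped ceiling division, then ONE flat loop over tile
-- indices k, recovering (row tile, col tile) = divmod(k, ncols).
def calculate_tiling_py_alt (input_size : Int) (output_size : Int) (tile_size : Int) : List (Int × Int × Int × Int) :=
  let nrows := max 0 (-(PySem.Int.floordiv (-output_size) tile_size))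
  let ncols := max 0 (-(PySem.Int.floordiv (-input_size) tile_size))
  (PySem.List.pyRange 0 (nrows * ncols) 1).foldl (fun tiles k =>
    let i := PySem.Int.floordiv k ncols
    let j := PySem.Int.mod k ncols
    let rs := i * tile_size
    let cs := j * tile_size
    tiles ++ [(rs, min (rs + tile_size) output_size, cs, min (cs + tile_size) input_size)]) []

-- ===== PRECONDITION & SPEC =====
-- Pre_ excludes tile_size = 0, on which Python A raises ValueError (range step 0)
-- and Python B raises ZeroDivisionError.
def Pre_calculate_tiling_py (_input_size : Int) (_output_size : Int) (tile_size : Int) : Prop := tile_size ≠ 0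
instance (input_size : Int) (output_size : Int) (tile_size : Int) : Decidable (Pre_calculate_tiling_py input_size output_size tile_size) := by unfold Pre_calculate_tiling_py; infer_instance
def pvWitness_calculate_tiling_py : Int × Int × Int := (5, 7, 3)

def Spec_calculate_tiling_py (input_size : Int) (output_size : Int) (tile_size : Int) (out : List (Int × Int × Int × Int)) : Prop := out = calculate_tiling_py_alt input_size output_size tile_size
instance (input_size : Int) (output_size : Int) (tile_size : Int) (out : List (Int × Int × Int × Int)) : Decidable (Spec_calculate_tiling_py input_size output_size tile_size out) := by unfold Spec_calculate_tiling_py; infer_instance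

-- ===== CLAIM (what is proved, stated in full; the proofs are below) =====
def Claim_equal_calculate_tiling_py : Prop := ∀ (input_size : Int) (output_size : Int) (tile_size : Int), Dom_calculate_tiling_py input_size output_size tile_size → Pre_calculate_tiling_py input_size output_size tile_size → Spec_calculate_tiling_py input_size output_size tile_size (calculate_tiling_py input_size output_size tile_size)

-- ===== LEMMAS AND PROOFS =====

-- For a positive step, the count used inside pyRange equals the clamped ceiling division.
theorem pv_ceil_count (n s : Int) (hs : 0 < s) :
    (if 0 < n then ((n + s - 1) / s).toNat else 0)
      = (max 0 (-(PySem.Int.floordiv (-n) s))).toNat := by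
  have hc : (-(PySem.Int.floordiv (-n) s) - 1) * s < n ∧ n ≤ -(PySem.Int.floordiv (-n) s) * s :=
    (PySem.Int.neg_floordiv_neg_eq_iff_of_pos hs).mp rfl
  set c := -(PySem.Int.floordiv (-n) s) with hcdef
  by_cases hn : 0 < n
  · have hcpos : 0 < c := by nlinarith [hc.1, hc.2]
    have hdiv : (n + s - 1) / s = c := by
      rw [← PySem.Int.floordiv_eq_ediv_of_pos hs, PySem.Int.floordiv_eq_iff_of_pos hs]
      constructor <;> nlinarith [hc.1, hc.2]
    rw [if_pos hn, hdiv, max_eq_right hcpos.le]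
  · have hcle : c ≤ 0 := by nlinarith [hc.1, hc.2]
    rw [if_neg hn, max_eq_left hcle]
    simp

-- pyRange from 0 with nonzero step, as a map over List.range of the clamped ceiling count.
theorem pv_pyRange_zero_eq (n s : Int) (hs : s ≠ 0) :
    PySem.List.pyRange 0 n s
      = (List.range (max 0 (-(PySem.Int.floordiv (-n) s))).toNat).map
          (fun (k : Nat) => (k : Int) * s) := by
  have hf : (fun (k : Nat) => 0 + s * (k : Int)) = (fun (k : Nat) => (k : Int) * s) := by
    funext k; ring
  unfold PySem.List.pyRange
  rcases lt_or_gt_of_ne hs with hneg | hpos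
  · simp only [if_neg hs, if_neg (not_lt.mpr hneg.le)]
    rw [hf]
    congr 2
    have h2 := pv_ceil_count (-n) (-s) (by omega)
    rw [PySem.Int.floordiv_neg_neg] at h2
    rw [show (0 : Int) - n + -s - 1 = -n + -s - 1 by ring]
    simp only [show (n < 0) ↔ (0 < -n) from by omega]
    exact h2
  · simp only [if_neg hs, if_pos hpos]
    rw [hf]
    congr 2
    rw [show n - 0 + s - 1 = n + s - 1 by ring]
    exact pv_ceil_count n s hpos

-- Flattening a row-major grid: one flat index with divmod equals the nested enumeration.
theorem pv_grid {α : Type} (C : Nat) (g : Int → Int → α) : ∀ R : Nat,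
    (List.range (R * C)).map
        (fun (k : Nat) => g (PySem.Int.floordiv (k : Int) (C : Int)) (PySem.Int.mod (k : Int) (C : Int)))
      = (List.range R).flatMap
          (fun (i : Nat) => (List.range C).map (fun (j : Nat) => g (i : Int) (j : Int))) := by
  intro R
  induction R with
  | zero => simp
  | succ R ih =>
    rw [show (R + 1) * C = R * C + C by ring, List.range_add, List.map_append, ih,
      List.range_succ, List.flatMap_append, List.flatMap_singleton, List.map_map]
    congr 1
    apply List.map_congr_left
    intro j hj
    have hjC : j < C := List.mem_range.mp hj
    have hC : 0 < C := lt_of_le_of_lt (Nat.zero_le j) hjC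
    simp only [Function.comp_apply]
    rw [PySem.Int.floordiv_natCast, PySem.Int.mod_natCast]
    have hdiv : (R * C + j) / C = R := by
      rw [show R * C + j = j + C * R by ring, Nat.add_mul_div_left _ _ hC,
        Nat.div_eq_of_lt hjC]; omega
    have hmod : (R * C + j) % C = j := by
      rw [show R * C + j = j + C * R by ring, Nat.add_mul_mod_self_left,
        Nat.mod_eq_of_lt hjC]
    rw [hdiv, hmod]

-- ===== VERDICT (by name: the statement is the Claim_ definition above) =====
theorem calculate_tiling_py_spec : Claim_equal_calculate_tiling_py := by
  intro input_size output_size tile_size _ hpre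
  unfold Spec_calculate_tiling_py calculate_tiling_py calculate_tiling_py_alt
  simp only [PySem.List.foldl_append_singleton_eq_map, PySem.List.foldl_append_eq_flatMap,
    List.nil_append]
  set R := (max 0 (-(PySem.Int.floordiv (-output_size) tile_size))).toNat with hR
  set C := (max 0 (-(PySem.Int.floordiv (-input_size) tile_size))).toNat with hC
  have hRc : ((R : Int)) = max 0 (-(PySem.Int.floordiv (-output_size) tile_size)) :=
    Int.toNat_of_nonneg (le_max_left _ _)
  have hCc : ((C : Int)) = max 0 (-(PySem.Int.floordiv (-input_size) tile_size)) :=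
    Int.toNat_of_nonneg (le_max_left _ _)
  rw [pv_pyRange_zero_eq output_size tile_size hpre, ← hR,
      pv_pyRange_zero_eq input_size tile_size hpre, ← hC,
      ← hRc, ← hCc]
  have hbound : PySem.List.pyRange 0 ((R : Int) * (C : Int)) 1
      = (List.range (R * C)).map (fun (k : Nat) => (k : Int)) := by
    rw [PySem.List.pyRange_one,
      show ((R : Int) * (C : Int) - 0).toNat = R * C by
        rw [sub_zero, ← Nat.cast_mul, Int.toNat_natCast]]
    simp only [zero_add]
  rw [hbound, List.map_map, List.flatMap_map]
  simp only [List.map_map, Function.comp_def]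
  exact (pv_grid C
    (fun a b => (a * tile_size, min (a * tile_size + tile_size) output_size,
                 b * tile_size, min (b * tile_size + tile_size) input_size)) R).symm
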